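-- pv_equiv track=rewrite | github.com/haokai-xuan/Competitive-Programming | AdventOfCode/2025/Day10-Factory-P2.py | get_pattern_costs
-- ===== SOURCE A (Python) =====
-- from itertools import combinations
--
-- def get_pattern_costs(buttons):
--     out = {}
--     n = len(buttons)
--     k = len(buttons[0])
--     for pattern_len in range(n + 1):
--         for btn_indices in combinations(range(n), pattern_len):
--             pattern = tuple(map(sum, zip(tuple([0] * k), *(buttons[i] for i in btn_indices))))
--             if pattern not in out:
--                 out[pattern] = pattern_len
--     return out
-- ===== SOURCE B (Python) =====
-- def get_pattern_costs(buttons):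
--     # Level-by-level BFS over index-subsets in lex order, extending each partial
--     # sum by one row instead of recomputing each combination's sum from scratch.
--     n = len(buttons)
--     k = len(buttons[0])
--     rows = [tuple(row) for row in buttons]
--     out = {}
--     level = 0
--     frontier = [(tuple([0] * k), 0)]  # (partial sum vector, next index allowed)
--     while frontier:
--         nxt = []
--         for vec, start in frontier:
--             if vec not in out:
--                 out[vec] = level
--             for j in range(start, n):
--                 nxt.append((tuple(a + b for a, b in zip(vec, rows[j])), j + 1))
--         frontier = nxt
--         level += 1
--     return out
-- ===== Notes on version B (the rewrite author's own statement) =====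
-- stated objective: alternative
-- what changed: B replaces A's itertools.combinations enumeration (each pattern re-summed from all its rows) by a level-by-level BFS frontier of (partial sum, next index) pairs that extends each sum by one row at a time; intended as a constant-factor speed-up, measured 1.79x at the largest size both finished, so not claimed as faster.
-- outside the precondition, e.g. on get_pattern_costs([]): A raises IndexError, B raises IndexError
import Mathlib
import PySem

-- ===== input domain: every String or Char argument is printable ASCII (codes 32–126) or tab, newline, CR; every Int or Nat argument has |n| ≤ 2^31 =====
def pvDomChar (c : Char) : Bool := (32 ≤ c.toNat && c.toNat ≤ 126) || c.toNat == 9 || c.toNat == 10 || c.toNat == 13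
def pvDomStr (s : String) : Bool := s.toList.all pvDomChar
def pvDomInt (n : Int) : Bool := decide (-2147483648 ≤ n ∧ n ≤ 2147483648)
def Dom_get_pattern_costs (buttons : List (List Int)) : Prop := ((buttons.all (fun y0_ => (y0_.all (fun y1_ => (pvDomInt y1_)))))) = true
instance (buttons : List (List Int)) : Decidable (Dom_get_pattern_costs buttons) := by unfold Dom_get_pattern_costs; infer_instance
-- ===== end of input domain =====

-- B replaces A's enumeration of all index-combinations (each pattern re-summed from scratch)
-- by a level-by-level frontier that extends each partial sum by one row at a time: an
-- 'alternative' decomposition (intended as faster; a timing run did not confirm it).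

-- shared elementwise addition: zip truncates to the shorter list, exactly like Python's zip
def pvZipAdd (u v : List Int) : List Int := List.zipWith (· + ·) u v

-- ===== PORT A =====
-- smallest index allowed after combination c (0 for the empty combination)
def pvStart (c : List Int) : Int := ((c.getLast?).map (· + 1)).getD 0

-- itertools.combinations(range(n), l): the size-l increasing index tuples in lexicographic order
def pvCombs (n : Int) : Nat → List (List Int)
  | 0 => [[]]
  | l + 1 => (pvCombs n l).flatMap
      (fun c => (PySem.List.pyRange (pvStart c) n 1).map (fun j => c ++ [j]))

def get_pattern_costs (buttons : List (List Int)) : List (List Int × Int) :=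
  let n := buttons.length
  let k := (buttons.headD []).length   -- buttons[0]; Pre_ excludes buttons = [] (IndexError)
  ((List.range (n + 1)).foldl (fun out l =>
      (pvCombs (n : Int) l).foldl (fun out c =>
        -- tuple(map(sum, zip(zeros_k, *rows))): the n-ary zip truncates to the shortest tuple
        -- and sums each column; folding the binary truncating zipWith (+) over the rows
        -- computes exactly those columns.
        let pattern := (c.map (fun i => PySem.List.pyGetD buttons i [])).foldl pvZipAdd
          (List.replicate k 0)
        if PySem.Dict.contains out pattern then out
        else PySem.Dict.insert out pattern (l : Int)) out)
    PySem.Dict.empty).items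

-- ===== PORT B =====
-- the while loop of Source B; fuel only bounds the recursion (the frontier empties after
-- level n + 1, so fuel n + 2 is never exhausted)
def pvLoop (buttons : List (List Int)) (n : Int) :
    Nat → Int → List (List Int × Int) → PySem.Dict (List Int) Int → PySem.Dict (List Int) Int
  | 0, _, _, out => out
  | fuel + 1, level, frontier, out =>
    if frontier = [] then out
    else
      let st := frontier.foldl (fun acc p =>
          (if PySem.Dict.contains acc.1 p.1 then acc.1 else PySem.Dict.insert acc.1 p.1 level,
           acc.2 ++ (PySem.List.pyRange p.2 n 1).map
             (fun j => (pvZipAdd p.1 (PySem.List.pyGetD buttons j []), j + 1))))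
        (out, ([] : List (List Int × Int)))
      pvLoop buttons n fuel (level + 1) st.2 st.1

def get_pattern_costs_alt (buttons : List (List Int)) : List (List Int × Int) :=
  let n := buttons.length
  let k := (buttons.headD []).length   -- buttons[0]; Pre_ excludes buttons = [] (IndexError)
  (pvLoop buttons (n : Int) (n + 2) 0 [(List.replicate k 0, 0)] PySem.Dict.empty).items

-- ===== PRECONDITION & SPEC =====
-- Pre_ excludes only the empty list, on which both Pythons raise IndexError at buttons[0].
def Pre_get_pattern_costs (buttons : List (List Int)) : Prop := buttons ≠ []
instance (buttons : List (List Int)) : Decidable (Pre_get_pattern_costs buttons) := by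
  unfold Pre_get_pattern_costs; infer_instance

def pvWitness_get_pattern_costs : List (List Int) := [[1, 2], [0, 3]]

def Spec_get_pattern_costs (buttons : List (List Int)) (out : List (List Int × Int)) : Prop := out = get_pattern_costs_alt buttons
instance (buttons : List (List Int)) (out : List (List Int × Int)) : Decidable (Spec_get_pattern_costs buttons out) := by unfold Spec_get_pattern_costs; infer_instance

-- ===== CLAIM (what is proved, stated in full; the proofs are below) =====
def Claim_equal_get_pattern_costs : Prop := ∀ (buttons : List (List Int)), Dom_get_pattern_costs buttons → Pre_get_pattern_costs buttons → Spec_get_pattern_costs buttons (get_pattern_costs buttons)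

-- ===== LEMMAS AND PROOFS =====

-- the pattern (truncated component-wise sum) of the rows selected by combination c
def pvPat (buttons : List (List Int)) (c : List Int) : List Int :=
  (c.map (fun i => PySem.List.pyGetD buttons i [])).foldl pvZipAdd
    (List.replicate (buttons.headD []).length 0)

-- one iteration of A's outer loop (insert the patterns of all size-l combinations)
def pvLevelStep (buttons : List (List Int)) (out : PySem.Dict (List Int) Int) (l : Nat) :
    PySem.Dict (List Int) Int :=
  (pvCombs (buttons.length : Int) l).foldl (fun out c =>
    let pattern := pvPat buttons c
    if PySem.Dict.contains out pattern then out
    else PySem.Dict.insert out pattern (l : Int)) out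

lemma pvStart_append (c : List Int) (j : Int) : pvStart (c ++ [j]) = j + 1 := by
  simp [pvStart]

lemma pvPat_append (buttons : List (List Int)) (c : List Int) (j : Int) :
    pvPat buttons (c ++ [j]) = pvZipAdd (pvPat buttons c) (PySem.List.pyGetD buttons j []) := by
  simp [pvPat, List.map_append, List.foldl_append]

lemma pvStart_ge (n : Int) : ∀ (l : Nat), ∀ c ∈ pvCombs n l, (l : Int) ≤ pvStart c := by
  intro l
  induction l with
  | zero => intro c hc; simp [pvCombs] at hc; simp [hc, pvStart]
  | succ l ih =>
    intro c hc
    simp only [pvCombs, List.mem_flatMap, List.mem_map] at hc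
    obtain ⟨c', hc', j, hj, rfl⟩ := hc
    rw [PySem.List.mem_pyRange_one] at hj
    have := ih c' hc'
    rw [pvStart_append]
    push_cast
    omega

lemma pvCombs_top (N : Nat) : pvCombs (N : Int) (N + 1) = [] := by
  rw [pvCombs, List.flatMap_eq_nil_iff]
  intro c hc
  have h := pvStart_ge (N : Int) N c hc
  rw [PySem.List.pyRange_one_eq_nil h]
  rfl

lemma pvCombs_nil_succ (n : Int) (l : Nat) (h : pvCombs n l = []) :
    pvCombs n (l + 1) = [] := by
  rw [pvCombs, h]; rfl

lemma pvLevelStep_nil (buttons : List (List Int)) (out : PySem.Dict (List Int) Int) :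
    ∀ (d l : Nat), pvCombs (buttons.length : Int) l = [] →
      (List.range' l d).foldl (pvLevelStep buttons) out = out := by
  intro d
  induction d generalizing out with
  | zero => intro l _; rfl
  | succ d ih =>
    intro l h
    rw [List.range'_succ, List.foldl_cons]
    have : pvLevelStep buttons out l = out := by rw [pvLevelStep, h]; rfl
    rw [this]
    exact ih out (l + 1) (pvCombs_nil_succ _ _ h)

-- the invariant: at level l the frontier is exactly the size-l combinations in lex order,
-- each carried as (its pattern, its next allowed index)
lemma pvLoop_eq (buttons : List (List Int)) :
    ∀ (d fuel l : Nat) (out : PySem.Dict (List Int) Int),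
      l + d = buttons.length + 1 → d < fuel →
      pvLoop buttons (buttons.length : Int) fuel (l : Int)
          ((pvCombs (buttons.length : Int) l).map (fun c => (pvPat buttons c, pvStart c))) out
        = (List.range' l d).foldl (pvLevelStep buttons) out := by
  intro d
  induction d with
  | zero =>
    intro fuel l out hl hfuel
    obtain ⟨f, rfl⟩ : ∃ f, fuel = f + 1 := ⟨fuel - 1, by omega⟩
    have : l = buttons.length + 1 := by omega
    subst this
    rw [pvCombs_top]
    rfl
  | succ d ih =>
    intro fuel l out hl hfuel
    obtain ⟨f, rfl⟩ : ∃ f, fuel = f + 1 := ⟨fuel - 1, by omega⟩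
    by_cases hnil : pvCombs (buttons.length : Int) l = []
    · rw [hnil]
      rw [pvLoop]
      rw [List.map_nil, if_pos rfl]
      exact (pvLevelStep_nil buttons out (d + 1) l hnil).symm
    · rw [pvLoop]
      rw [if_neg (by simpa using hnil)]
      rw [List.foldl_map]
      rw [PySem.List.foldl_prod_mk
        (f := fun acc (c : List Int) =>
          if PySem.Dict.contains acc (pvPat buttons c) then acc
          else PySem.Dict.insert acc (pvPat buttons c) (l : Int))
        (g := fun acc (c : List Int) =>
          acc ++ (PySem.List.pyRange (pvStart c) (buttons.length : Int) 1).map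
            (fun j => (pvZipAdd (pvPat buttons c) (PySem.List.pyGetD buttons j []), j + 1)))]
      have hfst : (pvCombs (buttons.length : Int) l).foldl
          (fun acc (c : List Int) =>
            if PySem.Dict.contains acc (pvPat buttons c) then acc
            else PySem.Dict.insert acc (pvPat buttons c) (l : Int)) out
          = pvLevelStep buttons out l := rfl
      have hsnd : (pvCombs (buttons.length : Int) l).foldl
          (fun acc (c : List Int) =>
            acc ++ (PySem.List.pyRange (pvStart c) (buttons.length : Int) 1).map
              (fun j => (pvZipAdd (pvPat buttons c) (PySem.List.pyGetD buttons j []), j + 1)))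
          ([] : List (List Int × Int))
          = (pvCombs (buttons.length : Int) (l + 1)).map
              (fun c => (pvPat buttons c, pvStart c)) := by
        rw [PySem.List.foldl_append_eq_flatMap]
        rw [List.nil_append]
        rw [pvCombs, List.map_flatMap]
        apply List.flatMap_congr  -- compare the per-combination child lists
        intro c _
        rw [List.map_map]
        apply List.map_congr_left
        intro j _
        simp [pvPat_append, pvStart_append]
      simp only [hfst, hsnd]
      have hcast : (l : Int) + 1 = ((l + 1 : Nat) : Int) := by push_cast; ring
      rw [hcast]
      rw [ih f (l + 1) (pvLevelStep buttons out l) (by omega) (by omega)]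
      rw [List.range'_succ, List.foldl_cons]

theorem get_pattern_costs_spec : Claim_equal_get_pattern_costs := by
  intro buttons _ _
  unfold Spec_get_pattern_costs get_pattern_costs get_pattern_costs_alt
  simp only []
  have h0 : [(List.replicate (buttons.headD []).length 0, (0 : Int))]
      = (pvCombs (buttons.length : Int) 0).map (fun c => (pvPat buttons c, pvStart c)) := by
    simp [pvCombs, pvPat, pvStart]
  rw [h0]
  have hz : (0 : Int) = ((0 : Nat) : Int) := rfl
  rw [hz, pvLoop_eq buttons (buttons.length + 1) (buttons.length + 2) 0 PySem.Dict.empty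
    (by omega) (by omega)]
  rw [List.range_eq_range']
  rfl
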